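-- pv_equiv track=rewrite | github.com/ChahelPaatur/Self-Modifying-Program-Synthesis-via-Online-Library-Evolution | brain_arc_solver.py | detect_tiling
-- ===== SOURCE A (Python) =====
-- from typing import List, Dict, Tuple, Optional, Callable
--
-- Grid = List[List[int]]
--
-- def detect_tiling(g: Grid) -> Optional[Tuple[int,int]]:
-- 	if not g: return None
-- 	h,w=len(g),len(g[0])
-- 	for th in range(1, h+1):
-- 		if h%th!=0: continue
-- 		for tw in range(1, w+1):
-- 			if w%tw!=0: continue
-- 			ok=True
-- 			for r in range(h):
-- 				for c in range(w):
-- 					if g[r][c] != g[r%th][c%tw]: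
-- 						ok=False; break
-- 				if not ok: break
-- 			if ok: return (th,tw)
-- 	return None
-- ===== SOURCE B (Python) =====
-- from typing import List, Tuple, Optional
--
-- Grid = List[List[int]]
--
-- def detect_tiling(g: Grid) -> Optional[Tuple[int, int]]:
--     if not g:
--         return None
--     h, w = len(g), len(g[0])
--     th = next((t for t in range(1, h + 1)
--                if h % t == 0 and all(g[r][:w] == g[r % t][:w] for r in range(h))), None)
--     tw = next((t for t in range(1, w + 1)
--                if w % t == 0 and all(g[r][c] == g[r][c % t]
--                                      for r in range(h) for c in range(w))), None)
--     if th is None or tw is None: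
--         return None
--     return (th, tw)
-- ===== Notes on version B (the rewrite author's own statement) =====
-- stated objective: alternative
-- what changed: Instead of testing every divisor pair (th,tw) of the grid against the whole grid, B computes the smallest vertical period and the smallest horizontal period independently and pairs them.
import Mathlib
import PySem

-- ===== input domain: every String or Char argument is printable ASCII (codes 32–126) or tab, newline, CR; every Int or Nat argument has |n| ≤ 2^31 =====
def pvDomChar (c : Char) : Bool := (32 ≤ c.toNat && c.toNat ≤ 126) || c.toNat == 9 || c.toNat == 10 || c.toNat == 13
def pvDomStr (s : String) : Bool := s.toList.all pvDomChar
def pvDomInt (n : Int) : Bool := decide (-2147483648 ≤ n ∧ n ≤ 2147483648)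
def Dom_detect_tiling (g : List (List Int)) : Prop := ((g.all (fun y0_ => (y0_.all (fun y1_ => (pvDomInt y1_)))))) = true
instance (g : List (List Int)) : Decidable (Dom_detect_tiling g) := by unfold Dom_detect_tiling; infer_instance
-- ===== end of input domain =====

-- B computes the minimal vertical period and the minimal horizontal period independently
-- instead of testing every divisor pair against the whole grid (objective: alternative).


-- ===== PORT A =====
-- g[r][c] (indices are Nat and in range on every admitted input; default never read inside Pre_)
def pvAt (g : List (List Int)) (r c : Nat) : Int := (g.getD r []).getD c 0

-- inner 'for c in range(w)' loop with its break (C is the remaining c-list)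
def pvRowLoop (g : List (List Int)) (th tw r : Nat) : List Nat → Bool
  | [] => true
  | c :: cs => if pvAt g r c ≠ pvAt g (r % th) (c % tw) then false else pvRowLoop g th tw r cs

-- 'for r in range(h)' loop with the ok-flag break (R is the remaining r-list)
def pvGridLoop (g : List (List Int)) (th tw w : Nat) : List Nat → Bool
  | [] => true
  | r :: rs => if pvRowLoop g th tw r (List.range w) then pvGridLoop g th tw w rs else false

-- 'for tw in range(1, w+1)' loop, returning at the first full match
def pvTwLoop (g : List (List Int)) (h w th : Nat) : List Nat → Option (Int × Int)
  | [] => none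
  | tw :: tws =>
    if w % tw ≠ 0 then pvTwLoop g h w th tws
    else if pvGridLoop g th tw w (List.range h) then some ((th : Int), (tw : Int))
    else pvTwLoop g h w th tws

-- 'for th in range(1, h+1)' loop
def pvThLoop (g : List (List Int)) (h w : Nat) : List Nat → Option (Int × Int)
  | [] => none
  | th :: ths =>
    if h % th ≠ 0 then pvThLoop g h w ths
    else match pvTwLoop g h w th (List.range' 1 w) with
      | some p => some p
      | none => pvThLoop g h w ths

def detect_tiling (g : List (List Int)) : Option (Int × Int) :=
  if g = [] then none
  else pvThLoop g g.length (g.headD []).length (List.range' 1 g.length)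

-- ===== PORT B =====
-- all(g[r][:w] == g[r % t][:w] for r in range(h))
def pvVOk (g : List (List Int)) (h w t : Nat) : Bool :=
  (List.range h).all fun r => ((g.getD r []).take w) == ((g.getD (r % t) []).take w)

-- all(g[r][c] == g[r][c % t] for r in range(h) for c in range(w))
def pvHOk (g : List (List Int)) (h w t : Nat) : Bool :=
  (List.range h).all fun r => (List.range w).all fun c =>
    ((g.getD r []).getD c 0) == ((g.getD r []).getD (c % t) 0)

def detect_tiling_alt (g : List (List Int)) : Option (Int × Int) :=
  if g = [] then none
  else
    let h := g.length
    let w := (g.headD []).length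
    match (List.range' 1 h).find? (fun t => h % t == 0 && pvVOk g h w t),
          (List.range' 1 w).find? (fun t => w % t == 0 && pvHOk g h w t) with
    | some th, some tw => some ((th : Int), (tw : Int))
    | _, _ => none

-- ===== PRECONDITION & SPEC =====
-- Pre_ excludes ragged grids in which some row is shorter than the first row: there Python A
-- always raises IndexError (it reads g[r][c] for all c < len(g[0])).
def Pre_detect_tiling (g : List (List Int)) : Prop :=
  ∀ row ∈ g, (g.headD []).length ≤ row.length
instance (g : List (List Int)) : Decidable (Pre_detect_tiling g) := by
  unfold Pre_detect_tiling; infer_instance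
def pvWitness_detect_tiling : List (List Int) := [[1, 2, 1, 2], [1, 2, 1, 2]]

def Spec_detect_tiling (g : List (List Int)) (out : Option (Int × Int)) : Prop := out = detect_tiling_alt g
instance (g : List (List Int)) (out : Option (Int × Int)) : Decidable (Spec_detect_tiling g out) := by unfold Spec_detect_tiling; infer_instance

-- ===== CLAIM (what is proved, stated in full; the proofs are below) =====
def Claim_equal_detect_tiling : Prop := ∀ (g : List (List Int)), Dom_detect_tiling g → Pre_detect_tiling g → Spec_detect_tiling g (detect_tiling g)


-- ===== LEMMAS AND PROOFS =====

theorem pvBoolExt {a b : Bool} (h : a = true ↔ b = true) : a = b := by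
  cases a <;> cases b <;> simp_all

theorem pvRowLoop_eq_true (g : List (List Int)) (th tw r : Nat) :
    ∀ (C : List Nat), (pvRowLoop g th tw r C = true ↔
      ∀ c ∈ C, pvAt g r c = pvAt g (r % th) (c % tw)) := by
  intro C
  induction C with
  | nil => simp [pvRowLoop]
  | cons c cs ih =>
    simp only [pvRowLoop]
    by_cases hc : pvAt g r c ≠ pvAt g (r % th) (c % tw)
    · simp [hc]
    · push Not at hc
      simp [hc, ih]

theorem pvGridLoop_eq_true (g : List (List Int)) (th tw w : Nat) :
    ∀ (R : List Nat), (pvGridLoop g th tw w R = true ↔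
      ∀ r ∈ R, ∀ c < w, pvAt g r c = pvAt g (r % th) (c % tw)) := by
  intro R
  induction R with
  | nil => simp [pvGridLoop]
  | cons r rs ih =>
    simp only [pvGridLoop]
    by_cases hr : pvRowLoop g th tw r (List.range w) = true
    · rw [if_pos hr, ih]
      have hrow : ∀ c < w, pvAt g r c = pvAt g (r % th) (c % tw) :=
        fun c hc => (pvRowLoop_eq_true g th tw r (List.range w)).mp hr c (List.mem_range.mpr hc)
      constructor
      · intro hall x hx c hc
        rcases List.mem_cons.mp hx with rfl | hx'
        · exact hrow c hc
        · exact hall x hx' c hc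
      · intro hall x hx c hc; exact hall x (List.mem_cons_of_mem _ hx) c hc
    · rw [if_neg hr]
      apply iff_of_false (by simp)
      intro hcon
      exact hr ((pvRowLoop_eq_true g th tw r (List.range w)).mpr
        (fun c hcm => hcon r List.mem_cons_self c (List.mem_range.mp hcm)))

theorem pvTakeEq (a b : List Int) (w : Nat) (ha : w ≤ a.length) (hb : w ≤ b.length) :
    (a.take w = b.take w) ↔ ∀ c < w, a.getD c 0 = b.getD c 0 := by
  constructor
  · intro h c hc
    have h1 : (a.take w).getD c 0 = (b.take w).getD c 0 := by rw [h]
    rwa [List.getD_eq_getElem _ _ (by simp [hc, Nat.lt_of_lt_of_le hc ha]),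
         List.getD_eq_getElem _ _ (by simp [hc, Nat.lt_of_lt_of_le hc hb]),
         List.getElem_take, List.getElem_take,
         ← List.getD_eq_getElem a _ (Nat.lt_of_lt_of_le hc ha),
         ← List.getD_eq_getElem b _ (Nat.lt_of_lt_of_le hc hb)] at h1
  · intro h
    apply List.ext_getElem
    · simp [Nat.min_eq_left ha, Nat.min_eq_left hb]
    · intro i h1 h2
      have hi : i < w := by simp at h1; omega
      rw [List.getElem_take, List.getElem_take]
      rw [← List.getD_eq_getElem a _ (Nat.lt_of_lt_of_le hi ha),
          ← List.getD_eq_getElem b _ (Nat.lt_of_lt_of_le hi hb)]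
      exact h i hi

theorem pvVOk_iff (g : List (List Int)) (h w t : Nat)
    (hlen : ∀ r < h, w ≤ (g.getD r []).length) :
    (pvVOk g h w t = true ↔ ∀ r < h, ∀ c < w, pvAt g r c = pvAt g (r % t) c) := by
  unfold pvVOk
  simp only [List.all_eq_true, List.mem_range, beq_iff_eq]
  constructor
  · intro hv r hr c hc
    exact (pvTakeEq _ _ w (hlen r hr) (hlen (r % t) (Nat.lt_of_le_of_lt (Nat.mod_le r t) hr))).mp
      (hv r hr) c hc
  · intro hv r hr
    exact (pvTakeEq _ _ w (hlen r hr) (hlen (r % t) (Nat.lt_of_le_of_lt (Nat.mod_le r t) hr))).mpr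
      (fun c hc => hv r hr c hc)

theorem pvHOk_iff (g : List (List Int)) (h w t : Nat) :
    (pvHOk g h w t = true ↔ ∀ r < h, ∀ c < w, pvAt g r c = pvAt g r (c % t)) := by
  unfold pvHOk pvAt
  simp [List.all_eq_true, List.mem_range]

theorem pvFactor (g : List (List Int)) (h w th tw : Nat)
    (hth : 1 ≤ th) (htw : 1 ≤ tw) (htww : tw ≤ w) :
    ((∀ r < h, ∀ c < w, pvAt g r c = pvAt g (r % th) (c % tw)) ↔
      (∀ r < h, ∀ c < w, pvAt g r c = pvAt g (r % th) c) ∧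
      (∀ r < h, ∀ c < w, pvAt g r c = pvAt g r (c % tw))) := by
  constructor
  · intro hg
    have hmth : ∀ r : Nat, r % th % th = r % th := fun r =>
      Nat.mod_eq_of_lt (Nat.mod_lt r hth)
    have hmtw : ∀ c : Nat, c % tw % tw = c % tw := fun c =>
      Nat.mod_eq_of_lt (Nat.mod_lt c htw)
    constructor
    · intro r hr c hc
      have h1 := hg r hr c hc
      have h2 := hg (r % th) (Nat.lt_of_le_of_lt (Nat.mod_le r th) hr) c hc
      rw [hmth] at h2
      rw [h1, h2]
    · intro r hr c hc
      have h1 := hg r hr c hc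
      have h2 := hg r hr (c % tw) (Nat.lt_of_lt_of_le (Nat.mod_lt c htw) htww)
      rw [hmtw] at h2
      rw [h1, h2]
  · rintro ⟨hv, hh⟩ r hr c hc
    rw [hh r hr c hc,
        hv r hr (c % tw) (Nat.lt_of_lt_of_le (Nat.mod_lt c htw) htww)]

theorem pvGrid_eq (g : List (List Int)) (h w th tw : Nat)
    (hlen : ∀ r < h, w ≤ (g.getD r []).length)
    (hth : 1 ≤ th) (htw : 1 ≤ tw) (htww : tw ≤ w) :
    pvGridLoop g th tw w (List.range h) = (pvVOk g h w th && pvHOk g h w tw) := by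
  apply pvBoolExt
  rw [pvGridLoop_eq_true, Bool.and_eq_true, pvVOk_iff g h w th hlen, pvHOk_iff g h w tw]
  simp only [List.mem_range]
  exact pvFactor g h w th tw hth htw htww

theorem pvTwLoop_eq (g : List (List Int)) (h w th : Nat)
    (hlen : ∀ r < h, w ≤ (g.getD r []).length) (hth : 1 ≤ th)
    (hv : pvVOk g h w th = true) :
    ∀ (L : List Nat), (∀ t ∈ L, 1 ≤ t ∧ t ≤ w) →
      pvTwLoop g h w th L =
        (L.find? (fun t => w % t == 0 && pvHOk g h w t)).map
          (fun t => ((th : Int), (t : Int))) := by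
  intro L
  induction L with
  | nil => intro _; rfl
  | cons tw tws ih =>
    intro hb
    obtain ⟨h1, h2⟩ := hb tw (by simp)
    have hrest := fun t ht => hb t (List.mem_cons_of_mem _ ht)
    simp only [pvTwLoop]
    by_cases hd : w % tw ≠ 0
    · rw [if_pos hd, List.find?_cons_of_neg (by simp [hd]), ih hrest]
    · push Not at hd
      rw [if_neg (by simp [hd]), pvGrid_eq g h w th tw hlen hth h1 h2, hv]
      by_cases hH : pvHOk g h w tw = true
      · rw [List.find?_cons_of_pos (by simp [hd, hH])]
        simp [hH]
      · rw [List.find?_cons_of_neg (by simp [hd, hH])]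
        simp only [Bool.true_and]
        rw [if_neg (by simp [hH]), ih hrest]

theorem pvTwLoop_none (g : List (List Int)) (h w th : Nat)
    (hlen : ∀ r < h, w ≤ (g.getD r []).length) (hth : 1 ≤ th)
    (hv : pvVOk g h w th = false) :
    ∀ (L : List Nat), (∀ t ∈ L, 1 ≤ t ∧ t ≤ w) → pvTwLoop g h w th L = none := by
  intro L
  induction L with
  | nil => intro _; rfl
  | cons tw tws ih =>
    intro hb
    obtain ⟨h1, h2⟩ := hb tw (by simp)
    have hrest := fun t ht => hb t (List.mem_cons_of_mem _ ht)
    simp only [pvTwLoop]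
    by_cases hd : w % tw ≠ 0
    · rw [if_pos hd, ih hrest]
    · rw [if_neg hd, pvGrid_eq g h w th tw hlen hth h1 h2, hv]
      simp only [Bool.false_and]
      rw [if_neg (by simp), ih hrest]

theorem pvThLoop_eq (g : List (List Int)) (h w : Nat)
    (hlen : ∀ r < h, w ≤ (g.getD r []).length) :
    ∀ (L : List Nat), (∀ t ∈ L, 1 ≤ t) →
      pvThLoop g h w L =
        (match L.find? (fun t => h % t == 0 && pvVOk g h w t),
               (List.range' 1 w).find? (fun t => w % t == 0 && pvHOk g h w t) with
         | some th, some tw => some ((th : Int), (tw : Int))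
         | _, _ => none) := by
  intro L
  induction L with
  | nil => intro _; rfl
  | cons th ths ih =>
    intro hb
    have h1 := hb th (by simp)
    have hrest := fun t ht => hb t (List.mem_cons_of_mem _ ht)
    have hrange : ∀ t ∈ List.range' 1 w, 1 ≤ t ∧ t ≤ w := by
      intro t ht
      rw [List.mem_range'_1] at ht
      omega
    simp only [pvThLoop]
    by_cases hd : h % th ≠ 0
    · rw [if_pos hd, List.find?_cons_of_neg (by simp [hd]), ih hrest]
    · push Not at hd
      rw [if_neg (by simp [hd])]
      by_cases hv : pvVOk g h w th = true
      · rw [List.find?_cons_of_pos (by simp [hd, hv])]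
        rw [pvTwLoop_eq g h w th hlen h1 hv _ hrange]
        cases hf : (List.range' 1 w).find? (fun t => w % t == 0 && pvHOk g h w t) with
        | none =>
          simp only [Option.map]
          rw [ih hrest, hf]
          cases ths.find? (fun t => h % t == 0 && pvVOk g h w t) <;> rfl
        | some tw => simp
      · rw [List.find?_cons_of_neg (by simp [hv])]
        rw [pvTwLoop_none g h w th hlen h1 (by simpa using hv) _ hrange, ih hrest]

-- ===== VERDICT (by name: the statement is the Claim_ definition above) =====
theorem detect_tiling_spec : Claim_equal_detect_tiling := by
  intro g _ hPre
  unfold Spec_detect_tiling detect_tiling detect_tiling_alt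
  by_cases hg : g = []
  · simp [hg]
  · rw [if_neg hg, if_neg hg]
    have hlen : ∀ r < g.length, (g.headD []).length ≤ (g.getD r []).length := by
      intro r hr
      rw [List.getD_eq_getElem g [] hr]
      exact hPre g[r] (List.getElem_mem hr)
    rw [pvThLoop_eq g g.length (g.headD []).length hlen _
         (by intro t ht; rw [List.mem_range'_1] at ht; omega)]
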